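-- pv_equiv track=rewrite | github.com/STliuEN/CCGC | scripts/render_dsafc_paper_figures.py | reorder_main_table_columns
-- ===== SOURCE A (Python) =====
-- COMPETITIVE_RIGHT_BLOCK = ("DFCN", "CCGC", "SCGC-S", "GLAC-GCN", "SCGC-N", "SCGC-N*", "Ours")
--
-- def reorder_main_table_columns(columns: list[str], rows: list[list[str]]) -> tuple[list[str], list[list[str]]]:
--     if len(columns) <= 2:
--         return columns, rows
--     methods = columns[2:]
--     trailing = [method for method in COMPETITIVE_RIGHT_BLOCK if method in methods]
--     leading = [method for method in methods if method not in trailing]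
--     reordered_methods = leading + trailing
--     method_to_idx = {method: idx for idx, method in enumerate(methods, start=2)}
--     new_indices = [0, 1] + [method_to_idx[method] for method in reordered_methods]
--     new_columns = [columns[idx] for idx in new_indices]
--     new_rows = [[row[idx] for idx in new_indices] for row in rows]
--     return new_columns, new_rows
-- ===== SOURCE B (Python) =====
-- COMPETITIVE_RIGHT_BLOCK = ("DFCN", "CCGC", "SCGC-S", "GLAC-GCN", "SCGC-N", "SCGC-N*", "Ours")
--
-- def reorder_main_table_columns(columns: list[str], rows: list[list[str]]) -> tuple[list[str], list[list[str]]]: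
--     # Column-major: build whole columns keyed by method name, order them, transpose back.
--     if len(columns) <= 2:
--         return columns, rows
--     methods = columns[2:]
--     trailing = [m for m in COMPETITIVE_RIGHT_BLOCK if m in methods]
--     order = [m for m in methods if m not in trailing] + trailing
--     col_by_name = {name: [row[i] for row in rows] for i, name in enumerate(columns) if i >= 2}
--     cols = [[row[0] for row in rows], [row[1] for row in rows]] + [col_by_name[m] for m in order]
--     new_rows = [[col[j] for col in cols] for j in range(len(rows))]
--     return [columns[0], columns[1]] + order, new_rows
-- ===== Notes on version B (the rewrite author's own statement) =====
-- stated objective: alternative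
-- what changed: B rebuilds the table column-major: it builds whole columns keyed by method name in a dict, picks the two fixed leading columns and the reordered method columns, and transposes back, instead of A's per-row gathering through a list of new indices.
import Mathlib
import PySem

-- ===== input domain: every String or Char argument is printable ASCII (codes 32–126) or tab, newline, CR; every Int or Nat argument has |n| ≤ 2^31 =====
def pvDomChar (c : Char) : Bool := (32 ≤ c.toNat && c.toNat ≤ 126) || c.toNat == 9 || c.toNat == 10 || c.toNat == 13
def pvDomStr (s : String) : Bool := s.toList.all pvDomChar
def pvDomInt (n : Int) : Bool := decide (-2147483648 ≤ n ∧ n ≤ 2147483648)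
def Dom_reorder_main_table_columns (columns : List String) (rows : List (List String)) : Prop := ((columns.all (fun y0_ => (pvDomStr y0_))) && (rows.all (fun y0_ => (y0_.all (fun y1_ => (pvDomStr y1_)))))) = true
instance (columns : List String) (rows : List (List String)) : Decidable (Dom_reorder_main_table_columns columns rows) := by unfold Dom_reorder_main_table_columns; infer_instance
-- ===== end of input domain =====

-- B rebuilds the table column-major (whole columns keyed by method name, then a transpose)
-- instead of A's per-row index gathering; objective: alternative decomposition, same cost.

def pvCRB : List String := ["DFCN", "CCGC", "SCGC-S", "GLAC-GCN", "SCGC-N", "SCGC-N*", "Ours"]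

-- ===== PORT A =====
def reorder_main_table_columns (columns : List String) (rows : List (List String)) : List String × List (List String) :=
  if columns.length ≤ 2 then (columns, rows) else
    let methods := PySem.List.slice columns (some 2) none
    let trailing := pvCRB.filter (fun m => methods.contains m)
    let leading := methods.filter (fun m => !trailing.contains m)
    let reordered := leading ++ trailing
    let methodToIdx : PySem.Dict String Int :=
      (PySem.List.enumerate methods 2).foldl (fun d p => d.insert p.2 p.1) PySem.Dict.empty
    let newIndices : List Int := [0, 1] ++ reordered.map (fun m => methodToIdx.getD m 0)
    let newColumns := newIndices.map (fun i => (PySem.List.pyGet? columns i).getD "")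
    let newRows := rows.map (fun row => newIndices.map (fun i => (PySem.List.pyGet? row i).getD ""))
    (newColumns, newRows)

-- ===== PORT B =====
def reorder_main_table_columns_alt (columns : List String) (rows : List (List String)) : List String × List (List String) :=
  if columns.length ≤ 2 then (columns, rows) else
    let methods := PySem.List.slice columns (some 2) none
    let trailing := pvCRB.filter (fun m => methods.contains m)
    let order := methods.filter (fun m => !trailing.contains m) ++ trailing
    let colByName : PySem.Dict String (List String) :=
      (PySem.List.enumerate columns 0).foldl
        (fun d p => if 2 ≤ p.1 then d.insert p.2 (rows.map (fun row => (PySem.List.pyGet? row p.1).getD "")) else d)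
        PySem.Dict.empty
    let cols := (rows.map (fun row => (PySem.List.pyGet? row 0).getD "")) ::
                (rows.map (fun row => (PySem.List.pyGet? row 1).getD "")) ::
                order.map (fun m => colByName.getD m [])
    let newRows := (List.range rows.length).map (fun (j : Nat) => cols.map (fun col => (PySem.List.pyGet? col (j : Int)).getD ""))
    (((PySem.List.pyGet? columns 0).getD "") :: ((PySem.List.pyGet? columns 1).getD "") :: order, newRows)

-- ===== PRECONDITION & SPEC =====
-- Pre_ excludes exactly the inputs where the Python A raises IndexError:
-- more than 2 columns together with some row shorter than `columns`.
def Pre_reorder_main_table_columns (columns : List String) (rows : List (List String)) : Prop :=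
  columns.length ≤ 2 ∨ ∀ row ∈ rows, columns.length ≤ row.length
instance (columns : List String) (rows : List (List String)) : Decidable (Pre_reorder_main_table_columns columns rows) := by unfold Pre_reorder_main_table_columns; infer_instance
def pvWitness_reorder_main_table_columns : List String × List (List String) :=
  (["Dataset", "Metric", "DFCN", "Kmeans"], [["ACC", "1", "2", "3"], ["NMI", "4", "5", "6"]])

def Spec_reorder_main_table_columns (columns : List String) (rows : List (List String)) (out : List String × List (List String)) : Prop := out = reorder_main_table_columns_alt columns rows
instance (columns : List String) (rows : List (List String)) (out : List String × List (List String)) : Decidable (Spec_reorder_main_table_columns columns rows out) := by unfold Spec_reorder_main_table_columns; infer_instance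

-- ===== CLAIM (what is proved, stated in full; the proofs are below) =====
def Claim_equal_reorder_main_table_columns : Prop := ∀ (columns : List String) (rows : List (List String)), Dom_reorder_main_table_columns columns rows → Pre_reorder_main_table_columns columns rows → Spec_reorder_main_table_columns columns rows (reorder_main_table_columns columns rows)

-- ===== LEMMAS AND PROOFS =====

-- index of the LAST pair in ps whose key (second component) is m
def pvLastIdx? (ps : List (Int × String)) (m : String) : Option Int :=
  ((ps.filter (fun p => p.2 == m)).getLast?).map (·.1)

theorem pv_get?_fold_insert {ν : Type} (v : Int → ν) (ps : List (Int × String))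
    (d : PySem.Dict String ν) (m : String) :
    ((ps.foldl (fun d p => d.insert p.2 (v p.1)) d).get? m)
      = (pvLastIdx? ps m).elim (d.get? m) (fun i => some (v i)) := by
  induction ps generalizing d with
  | nil => simp [pvLastIdx?]
  | cons p rest ih =>
    simp only [List.foldl_cons, ih, pvLastIdx?, List.filter_cons]
    by_cases hk : p.2 = m
    · simp only [hk, beq_self_eq_true, if_true]
      cases hrest : (rest.filter (fun q => q.2 == m)).getLast? with
      | none =>
        have hnil : rest.filter (fun q => q.2 == m) = [] := by
          cases h : rest.filter (fun q => q.2 == m) with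
          | nil => rfl
          | cons a l => rw [h] at hrest; simp [List.getLast?] at hrest
        simp [hnil]
      | some q =>
        have : ((p :: rest.filter (fun q => q.2 == m)).getLast?) = some q := by
          cases h : rest.filter (fun q => q.2 == m) with
          | nil => rw [h] at hrest; simp at hrest
          | cons a l => rw [List.getLast?_cons_cons, ← h, hrest]
        simp [this]
    · have : (p.2 == m) = false := by simp [hk]
      simp [this, PySem.Dict.get?_insert, Ne.symm hk]

theorem pv_lastIdx?_mem {ps : List (Int × String)} {m : String} {i : Int}
    (h : pvLastIdx? ps m = some i) : (i, m) ∈ ps := by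
  unfold pvLastIdx? at h
  cases hl : (ps.filter (fun p => p.2 == m)).getLast? with
  | none => rw [hl] at h; simp at h
  | some q =>
    rw [hl] at h
    have hq : q ∈ ps.filter (fun p => p.2 == m) := List.mem_of_getLast? hl
    rw [List.mem_filter] at hq
    obtain ⟨hmem, hk⟩ := hq
    have : q = (i, m) := by
      have h1 : q.1 = i := by simpa using h
      have h2 : q.2 = m := by simpa using hk
      cases q; simp_all
    rwa [this] at hmem

theorem pv_lastIdx?_isSome {ms : List String} {m : String} (s : Int) (h : m ∈ ms) :
    (pvLastIdx? (PySem.List.enumerate ms s) m).isSome := by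
  obtain ⟨k, hk, rfl⟩ := List.getElem_of_mem h
  have hmem : (s + (k : Int), ms[k]) ∈ PySem.List.enumerate ms s := by
    rw [PySem.List.mem_enumerate_iff]; exact ⟨k, hk, rfl⟩
  have : (s + (k : Int), ms[k]) ∈ (PySem.List.enumerate ms s).filter (fun p => p.2 == ms[k]) := by
    rw [List.mem_filter]; exact ⟨hmem, by simp⟩
  unfold pvLastIdx?
  have hne := List.ne_nil_of_mem this
  rw [Option.isSome_map]
  simpa [List.getLast?_isSome] using hne

-- reading entry j of a column built as rows.map h
theorem pv_colget {α : Type} (rows : List α) (h : α → String) (j : Nat) (hj : j < rows.length) :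
    (PySem.List.pyGet? (rows.map h) (j : Int)).getD "" = h rows[j] := by
  rw [PySem.List.pyGet?_natCast, List.getElem?_map, List.getElem?_eq_getElem hj]; rfl

-- l.map f written as a map over range (the shape of B's transpose)
theorem pv_map_as_range {α β : Type} (l : List α) (f : α → β) (g : Nat → β)
    (hg : ∀ (j : Nat) (h : j < l.length), g j = f l[j]) :
    (List.range l.length).map g = l.map f := by
  apply List.ext_getElem
  · simp
  · intro j h1 h2
    simp only [List.getElem_map, List.getElem_range]
    exact hg j (by simpa using h2)
theorem reorder_main_table_columns_spec : Claim_equal_reorder_main_table_columns := by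
  intro columns rows _ _
  unfold Spec_reorder_main_table_columns
  by_cases hlen : columns.length ≤ 2
  · simp [reorder_main_table_columns, reorder_main_table_columns_alt, hlen]
  · obtain ⟨c0, c1, ms, rfl⟩ : ∃ c0 c1 ms, columns = c0 :: c1 :: ms := by
      rcases columns with _ | ⟨c0, _ | ⟨c1, rest⟩⟩ <;> simp at hlen
      exact ⟨c0, c1, rest, rfl⟩
    simp only [reorder_main_table_columns, reorder_main_table_columns_alt, if_neg hlen]
    have hs : PySem.List.slice (c0 :: c1 :: ms) (some 2) none = ms := by
      rw [PySem.List.slice_from _ (by norm_num : (0:Int) ≤ 2)]; rfl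
    simp only [hs]
    have henum : PySem.List.enumerate (c0 :: c1 :: ms) = (0, c0) :: (1, c1) :: PySem.List.enumerate ms 2 := by
      rw [PySem.List.enumerate_cons, PySem.List.enumerate_cons]; norm_num
    have hfoldB : List.foldl (fun d p => if 2 ≤ p.1 then d.insert p.2 (rows.map (fun row => (PySem.List.pyGet? row p.1).getD "")) else d) PySem.Dict.empty (PySem.List.enumerate (c0 :: c1 :: ms))
        = List.foldl (fun d p => d.insert p.2 (rows.map (fun row => (PySem.List.pyGet? row p.1).getD ""))) PySem.Dict.empty (PySem.List.enumerate ms 2) := by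
      rw [henum]
      simp only [List.foldl_cons, if_neg (by norm_num : ¬ (2:Int) ≤ (0, c0).1), if_neg (by norm_num : ¬ (2:Int) ≤ (1, c1).1)]
      refine PySem.List.foldl_congr_mem' _ _ _ _ ?_
      intro p hp d
      rw [PySem.List.mem_enumerate_iff] at hp
      obtain ⟨k, hk, rfl⟩ := hp
      rw [if_pos (by simp)]
    simp only [hfoldB]
    have hA := fun (m : String) => pv_get?_fold_insert (fun x => x) (PySem.List.enumerate ms 2) PySem.Dict.empty m
    have hB := fun (m : String) => pv_get?_fold_insert (fun i => rows.map (fun row => (PySem.List.pyGet? row i).getD "")) (PySem.List.enumerate ms 2) PySem.Dict.empty m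
    have key : ∀ m ∈ ms,
        (List.foldl (fun d p => d.insert p.2 (rows.map (fun row => (PySem.List.pyGet? row p.1).getD ""))) PySem.Dict.empty (PySem.List.enumerate ms 2)).getD m []
          = rows.map (fun row => (PySem.List.pyGet? row ((List.foldl (fun d p => d.insert p.2 p.1) PySem.Dict.empty (PySem.List.enumerate ms 2)).getD m 0)).getD "")
        ∧ PySem.List.pyGet? (c0 :: c1 :: ms) ((List.foldl (fun d p => d.insert p.2 p.1) PySem.Dict.empty (PySem.List.enumerate ms 2)).getD m 0) = some m := by
      intro m hm
      obtain ⟨i, hi⟩ := Option.isSome_iff_exists.mp (pv_lastIdx?_isSome 2 hm)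
      have hmemE := pv_lastIdx?_mem hi
      rw [PySem.List.mem_enumerate_iff] at hmemE
      obtain ⟨k, hk, hpk⟩ := hmemE
      have hik : i = 2 + (k : Int) := congrArg Prod.fst hpk
      have hmk : ms[k] = m := (congrArg Prod.snd hpk).symm
      have hdA : (List.foldl (fun d p => d.insert p.2 p.1) PySem.Dict.empty (PySem.List.enumerate ms 2)).getD m 0 = i := by
        rw [PySem.Dict.getD_eq_get?_getD, hA m, hi]; rfl
      have hdB : (List.foldl (fun d p => d.insert p.2 (rows.map (fun row => (PySem.List.pyGet? row p.1).getD ""))) PySem.Dict.empty (PySem.List.enumerate ms 2)).getD m []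
          = rows.map (fun row => (PySem.List.pyGet? row i).getD "") := by
        rw [PySem.Dict.getD_eq_get?_getD, hB m, hi]; rfl
      refine ⟨by rw [hdB, hdA], ?_⟩
      rw [hdA, hik]
      rw [show (2 + (k : Int)) = ((k + 2 : Nat) : Int) by push_cast; ring]
      rw [PySem.List.pyGet?_natCast]
      rw [show k + 2 = (k + 1) + 1 from rfl]
      rw [List.getElem?_cons_succ, List.getElem?_cons_succ]
      rw [List.getElem?_eq_getElem hk, hmk]
    have hmemR : ∀ m ∈ (List.filter (fun m => !(List.filter (fun m => ms.contains m) pvCRB).contains m) ms ++ List.filter (fun m => ms.contains m) pvCRB), m ∈ ms := by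
      intro m hm
      rcases List.mem_append.mp hm with h | h
      · exact (List.mem_filter.mp h).1
      · have := (List.mem_filter.mp h).2; simpa using this
    have hmemL : ∀ m ∈ List.filter (fun m => !(List.filter (fun m => ms.contains m) pvCRB).contains m) ms, m ∈ ms :=
      fun m h => (List.mem_filter.mp h).1
    have hmemT : ∀ m ∈ List.filter (fun m => ms.contains m) pvCRB, m ∈ ms :=
      fun m h => by have := (List.mem_filter.mp h).2; simpa using this
    refine Prod.ext ?_ ?_
    · have hRmap : ∀ (L' : List String), (∀ m ∈ L', m ∈ ms) →
          List.map ((fun i => (PySem.List.pyGet? (c0 :: c1 :: ms) i).getD "") ∘ fun m =>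
            (List.foldl (fun d p => d.insert p.2 p.1) PySem.Dict.empty (PySem.List.enumerate ms 2)).getD m 0) L' = L' := by
        intro L' hL'
        calc List.map _ L' = List.map id L' := by
              apply List.map_congr_left
              intro m hm
              simp only [Function.comp_apply, id_eq]
              rw [(key m (hL' m hm)).2]
              rfl
          _ = L' := List.map_id _
      simp only [List.map_append, List.map_cons, List.map_nil, List.map_map,
        hRmap _ hmemL, hRmap _ hmemT]
      rfl
    · refine (pv_map_as_range rows _ _ ?_).symm
      intro j hj
      have hRmap2 : ∀ (L' : List String), (∀ m ∈ L', m ∈ ms) →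
          List.map ((fun col => (PySem.List.pyGet? col (j : Int)).getD "") ∘ fun m =>
            (List.foldl (fun d p => d.insert p.2 (List.map (fun row => (PySem.List.pyGet? row p.1).getD "") rows)) PySem.Dict.empty (PySem.List.enumerate ms 2)).getD m []) L'
          = List.map ((fun i => (PySem.List.pyGet? rows[j] i).getD "") ∘ fun m =>
            (List.foldl (fun d p => d.insert p.2 p.1) PySem.Dict.empty (PySem.List.enumerate ms 2)).getD m 0) L' := by
        intro L' hL'
        apply List.map_congr_left
        intro m hm
        simp only [Function.comp_apply]
        rw [(key m (hL' m hm)).1, pv_colget rows _ j hj]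
      simp only [List.map_cons, List.map_map, List.map_append, List.map_nil,
        pv_colget rows _ j hj, hRmap2 _ hmemL, hRmap2 _ hmemT]
      rfl
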